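-- pv_equiv track=rewrite | github.com/costbio/analyze_consensusdock | get_PM_scores.py | identify_blocks_to_build
-- ===== SOURCE A (Python) =====
-- def identify_blocks_to_build(total_blocks, completed_pairs):
--     """
--     Identify which blocks need to be built based on remaining comparisons.
--
--     Args:
--         total_blocks: Total number of blocks
--         completed_pairs: Set of completed pair IDs (e.g., "0_1")
--
--     Returns:
--         Set of block indices that need to be built
--     """
--     needed_blocks = set()
--
--     # Check all possible pairs in upper triangle
--     for i in range(total_blocks):
--         for j in range(i, total_blocks):
--             pair_id = f"{i}_{j}"
--             if pair_id not in completed_pairs: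
--                 # This pair needs to be compared, so we need both blocks
--                 needed_blocks.add(i)
--                 needed_blocks.add(j)
--
--     return needed_blocks
-- ===== SOURCE B (Python) =====
-- def identify_blocks_to_build(total_blocks, completed_pairs):
--     """
--     Identify which blocks need to be built based on remaining comparisons.
--
--     Instead of formatting every upper-triangle pair ID, parse completed_pairs
--     once into integer coordinates (via a label->index table), then per row
--     compute the missing columns by bulk set subtraction.
--     """
--     labels = {}
--     for k in range(total_blocks):
--         labels[str(k)] = k
--     done = {}
--     for s in completed_pairs:
--         head, sep, tail = s.partition('_')
--         if not sep:
--             continue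
--         i = labels.get(head)
--         j = labels.get(tail)
--         if i is None or j is None:
--             continue
--         done.setdefault(i, set()).add(j)
--     needed_blocks = set()
--     for i in range(total_blocks):
--         di = done.get(i)
--         missing = sorted(set(range(i, total_blocks)) - di) if di else range(i, total_blocks)
--         if missing:
--             needed_blocks.add(i)
--             needed_blocks.update(missing)
--     return needed_blocks
-- ===== Notes on version B (the rewrite author's own statement) =====
-- stated objective: faster
-- what changed: B never formats the O(n^2) pair-ID strings A builds: it parses completed_pairs once into integer coordinates through a str(k)->k label table built from n labels, groups completed columns by row, and per row obtains the missing columns by one bulk set subtraction (or the whole range when the row has no completed pair) instead of a per-pair membership test.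
import Mathlib
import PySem

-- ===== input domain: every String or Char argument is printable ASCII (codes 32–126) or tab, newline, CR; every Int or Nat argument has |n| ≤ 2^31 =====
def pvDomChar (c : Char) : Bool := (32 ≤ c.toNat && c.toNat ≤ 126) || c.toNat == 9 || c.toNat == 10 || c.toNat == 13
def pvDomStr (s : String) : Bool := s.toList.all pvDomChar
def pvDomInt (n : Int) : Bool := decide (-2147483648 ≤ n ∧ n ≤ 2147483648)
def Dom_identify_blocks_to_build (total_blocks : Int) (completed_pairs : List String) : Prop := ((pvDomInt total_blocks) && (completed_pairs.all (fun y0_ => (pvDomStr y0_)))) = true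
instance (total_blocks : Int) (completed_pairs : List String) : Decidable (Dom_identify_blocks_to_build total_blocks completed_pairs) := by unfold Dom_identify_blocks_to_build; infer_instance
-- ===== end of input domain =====

-- B parses completed_pairs once into integer coordinates through a str(k)->k label table
-- and emits each row's missing columns by bulk set subtraction, instead of formatting and
-- testing every upper-triangle pair ID as A does.

-- ===== PORT A =====
-- f"{i}_{j}"
def pvPairId (i j : Int) : String := PySem.Int.toStr i ++ "_" ++ PySem.Int.toStr j

def identify_blocks_to_build (total_blocks : Int) (completed_pairs : List String) : List Int :=
  (PySem.List.pyRange 0 total_blocks 1).foldl (fun needed_blocks i =>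
    (PySem.List.pyRange i total_blocks 1).foldl (fun needed_blocks j =>
      let pair_id := pvPairId i j
      if !(completed_pairs.contains pair_id) then
        PySem.Set.add (PySem.Set.add needed_blocks i) j
      else needed_blocks) needed_blocks) PySem.Set.empty

-- ===== PORT B =====
-- hand port of s.partition('_') for the one-char separator '_' (exact: head is the longest
-- '_'-free prefix; found iff some '_' occurs; tail is everything after the FIRST '_')
def pvPartitionU (s : String) : List Char × Bool × List Char :=
  let cs := s.toList
  let head := cs.takeWhile (fun c => c != '_')
  match cs.dropWhile (fun c => c != '_') with
  | [] => (head, false, [])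
  | _ :: t => (head, true, t)

-- first loop of Source B: labels = {str(k): k for k in range(total_blocks)}
def pvLabels (total_blocks : Int) : PySem.Dict (List Char) Int :=
  (PySem.List.pyRange 0 total_blocks 1).foldl
    (fun d k => d.insert (PySem.Int.toChars k) k) PySem.Dict.empty

-- second loop of Source B: done.setdefault(i, set()).add(j) is done[i] = done.get(i, set()) ∪ {j},
-- i.e. Dict.modify i ∅ (add j); labels.get returning None is get? = none
def pvDone (labels : PySem.Dict (List Char) Int) (completed_pairs : List String) :
    PySem.Dict Int (PySem.Set Int) :=
  completed_pairs.foldl (fun done s =>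
    match pvPartitionU s with
    | (_, false, _) => done
    | (head, true, tail) =>
      match labels.get? head, labels.get? tail with
      | some i, some j => done.modify i PySem.Set.empty (fun st => PySem.Set.add st j)
      | _, _ => done) PySem.Dict.empty

def identify_blocks_to_build_alt (total_blocks : Int) (completed_pairs : List String) : List Int :=
  let labels := pvLabels total_blocks
  let done := pvDone labels completed_pairs
  (PySem.List.pyRange 0 total_blocks 1).foldl (fun needed_blocks i =>
    -- done.get(i): None and the never-stored empty set both take the else branch, so getD ∅ is exact
    let di := (done.getD i PySem.Set.empty)
    let missing :=
      if !di.isEmpty then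
        PySem.List.sorted
          (PySem.Set.diff (PySem.Set.ofList (PySem.List.pyRange i total_blocks 1)) di)
          (fun x => x)
      else PySem.List.pyRange i total_blocks 1
    if !missing.isEmpty then
      PySem.Set.update (PySem.Set.add needed_blocks i) missing
    else needed_blocks) PySem.Set.empty

-- ===== PRECONDITION & SPEC =====
def Spec_identify_blocks_to_build (total_blocks : Int) (completed_pairs : List String) (out : List Int) : Prop := out = identify_blocks_to_build_alt total_blocks completed_pairs
instance (total_blocks : Int) (completed_pairs : List String) (out : List Int) : Decidable (Spec_identify_blocks_to_build total_blocks completed_pairs out) := by unfold Spec_identify_blocks_to_build; infer_instance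

-- ===== CLAIM (what is proved, stated in full; the proofs are below) =====
def Claim_equal_identify_blocks_to_build : Prop := ∀ (total_blocks : Int) (completed_pairs : List String), Dom_identify_blocks_to_build total_blocks completed_pairs → Spec_identify_blocks_to_build total_blocks completed_pairs (identify_blocks_to_build total_blocks completed_pairs)

-- ===== LEMMAS AND PROOFS =====

-- decimal digit characters are injective below the base
theorem pv_digitChar_inj (a b : Nat) (ha : a < 10) (hb : b < 10) (h : a.digitChar = b.digitChar) : a = b := by
  interval_cases a <;> interval_cases b <;> first | rfl | (exact absurd h (by decide))

theorem pv_toDigits10_inj : ∀ (a b : Nat), Nat.toDigits 10 a = Nat.toDigits 10 b → a = b := by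
  intro a
  induction a using Nat.strong_induction_on with
  | _ a ih =>
    intro b h
    rw [Nat.toDigits_eq_if (by norm_num)] at h
    rw [Nat.toDigits_eq_if (n := b) (by norm_num)] at h
    by_cases ha : a < 10 <;> by_cases hb : b < 10
    · rw [if_pos ha, if_pos hb] at h
      exact pv_digitChar_inj a b ha hb (List.cons.injEq .. ▸ h).1
    · rw [if_pos ha, if_neg hb] at h
      have := congrArg List.length h
      have hp := Nat.length_toDigits_pos (b := 10) (n := b / 10)
      simp only [List.length_cons, List.length_append, List.length_nil] at this; omega
    · rw [if_neg ha, if_pos hb] at h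
      have := congrArg List.length h
      have hp := Nat.length_toDigits_pos (b := 10) (n := a / 10)
      simp only [List.length_cons, List.length_append, List.length_nil] at this; omega
    · rw [if_neg ha, if_neg hb] at h
      obtain ⟨h1, h2⟩ := List.append_inj' h (by simp)
      have hm : a % 10 = b % 10 :=
        pv_digitChar_inj _ _ (Nat.mod_lt _ (by norm_num)) (Nat.mod_lt _ (by norm_num))
          (by simpa using h2)
      have hd : a / 10 = b / 10 := ih (a / 10) (Nat.div_lt_self (by omega) (by norm_num)) _ h1
      omega

-- every character of str(n) is '-' or a decimal digit
theorem pv_mem_toChars (i : Int) (c : Char) (h : c ∈ PySem.Int.toChars i) : c = '-' ∨ c.isDigit := by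
  unfold PySem.Int.toChars at h
  split at h
  · rcases List.mem_cons.mp h with rfl | h
    · exact Or.inl rfl
    · exact Or.inr (Nat.isDigit_of_mem_toDigits (by norm_num) (by norm_num) h)
  · exact Or.inr (Nat.isDigit_of_mem_toDigits (by norm_num) (by norm_num) h)

theorem pv_underscore_not_mem_toChars (i : Int) : '_' ∉ PySem.Int.toChars i := by
  intro h
  rcases pv_mem_toChars i _ h with h' | h' <;> simp [Char.isDigit] at h'

theorem pv_toChars_inj (a b : Int) (h : PySem.Int.toChars a = PySem.Int.toChars b) : a = b := by
  unfold PySem.Int.toChars at h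
  have hdig : ∀ (m k : Nat), ¬ ('-' :: Nat.toDigits 10 m = Nat.toDigits 10 k) := by
    intro m k hEq
    rcases hl : Nat.toDigits 10 k with _ | ⟨c, cs⟩
    · have := Nat.length_toDigits_pos (b := 10) (n := k); simp [hl] at this
    · rw [hl] at hEq
      have hc : c ∈ Nat.toDigits 10 k := by rw [hl]; exact List.mem_cons_self ..
      have := Nat.isDigit_of_mem_toDigits (by norm_num) (by norm_num) hc
      have hc' : c = '-' := ((List.cons.injEq ..).mp hEq).1.symm
      rw [hc'] at this; simp [Char.isDigit] at this
  split at h <;> split at h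
  · have := pv_toDigits10_inj _ _ ((List.cons.injEq ..).mp h).2
    omega
  · exact absurd h (hdig _ _)
  · exact absurd h.symm (hdig _ _)
  · have := pv_toDigits10_inj _ _ h
    omega

theorem pv_pairId_toList (i j : Int) : (pvPairId i j).toList = PySem.Int.toChars i ++ '_' :: PySem.Int.toChars j := by
  show ((PySem.Int.toStr i ++ "_" ++ PySem.Int.toStr j)).toList = _
  rw [String.toList_append, String.toList_append, PySem.Int.toList_toStr, PySem.Int.toList_toStr]
  simp

theorem pv_dropWhile_head (p : Char → Bool) : ∀ (l : List Char) (x : Char) (xs : List Char), l.dropWhile p = x :: xs → p x = false := by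
  intro l
  induction l with
  | nil => intro x xs h; simp at h
  | cons a l ih =>
    intro x xs h
    rw [List.dropWhile_cons] at h
    split at h
    · exact ih _ _ h
    · cases h; simp_all

-- what a successful partition says about the argument
theorem pv_partition_found (s : String) (h t : List Char) (hp : pvPartitionU s = (h, true, t)) :
    s.toList = h ++ '_' :: t ∧ '_' ∉ h := by
  unfold pvPartitionU at hp
  simp only at hp
  rcases hdw : s.toList.dropWhile (fun c => c != '_') with _ | ⟨c, rest⟩
  · rw [hdw] at hp; cases hp
  · rw [hdw] at hp
    have hc : c = '_' := by simpa using pv_dropWhile_head _ _ _ _ hdw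
    injection hp with h1 h2
    injection h2 with h2 h3
    constructor
    · have := List.takeWhile_append_dropWhile (p := fun c => c != '_') (l := s.toList)
      rw [hdw, hc] at this
      rw [← h1, ← h3]
      exact this.symm
    · rw [← h1]
      intro hmem
      have := List.mem_takeWhile_imp hmem
      simp at this

theorem pv_partition_pairId (i j : Int) : pvPartitionU (pvPairId i j) = (PySem.Int.toChars i, true, PySem.Int.toChars j) := by
  have hall : ∀ c ∈ PySem.Int.toChars i, (c != '_') = true := by
    intro c hc
    rcases eq_or_ne c '_' with rfl | hne
    · exact absurd hc (pv_underscore_not_mem_toChars i)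
    · simpa using hne
  unfold pvPartitionU
  simp only [pv_pairId_toList]
  rw [List.takeWhile_append_of_pos hall, List.dropWhile_append_of_pos hall]
  simp

-- the label table: items, unique keys, and what a lookup means
theorem pv_labels_items (n : Int) :
    (pvLabels n).items = (PySem.List.pyRange 0 n 1).map (fun k => (PySem.Int.toChars k, k)) := by
  unfold pvLabels
  have hfresh := PySem.Dict.items_foldl_insert_fresh (l := PySem.List.pyRange 0 n 1)
      (k := fun k => PySem.Int.toChars k) (v := fun k : Int => k)
      (d := PySem.Dict.empty)
      (by intro a _; exact PySem.Dict.contains_empty _)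
      ((PySem.List.nodup_pyRange_one 0 n).map_on (fun x _ y _ hxy => pv_toChars_inj x y hxy))
  simpa using hfresh

theorem pv_labels_nodup_keys (n : Int) : (pvLabels n).keys.Nodup := by
  show ((pvLabels n).items.map (·.1)).Nodup
  rw [pv_labels_items, List.map_map]
  exact (PySem.List.nodup_pyRange_one 0 n).map_on (fun x _ y _ hxy => pv_toChars_inj x y hxy)

theorem pv_labels_get? (n : Int) (h : List Char) (k : Int) :
    (pvLabels n).get? h = some k ↔ PySem.Int.toChars k = h ∧ 0 ≤ k ∧ k < n := by
  rw [PySem.Dict.get?_eq_some_iff_mem_items _ _ _ (pv_labels_nodup_keys n), pv_labels_items]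
  constructor
  · intro hm
    obtain ⟨x, hx, hxe⟩ := List.mem_map.mp hm
    obtain ⟨h1, h2⟩ := Prod.mk.injEq .. ▸ hxe
    obtain ⟨hx0, hxn⟩ := PySem.List.mem_pyRange_one.mp hx
    exact ⟨by rw [← h1, h2], by omega⟩
  · rintro ⟨rfl, hk⟩
    exact List.mem_map.mpr ⟨k, PySem.List.mem_pyRange_one.mpr (by omega), rfl⟩

-- the parse of one completed-pair string, as Source B's second loop sees it (proof-only name)
def pvParseLbl (labels : PySem.Dict (List Char) Int) (s : String) : Option (Int × Int) :=
  if (pvPartitionU s).2.1 then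
    match labels.get? (pvPartitionU s).1, labels.get? (pvPartitionU s).2.2 with
    | some i, some j => some (i, j)
    | _, _ => none
  else none

theorem pv_parse_eq_iff (n : Int) (s : String) (i j : Int) :
    pvParseLbl (pvLabels n) s = some (i, j)
      ↔ s = pvPairId i j ∧ 0 ≤ i ∧ i < n ∧ 0 ≤ j ∧ j < n := by
  constructor
  · intro hp
    unfold pvParseLbl at hp
    rcases hpp : pvPartitionU s with ⟨head, found, tail⟩
    rw [hpp] at hp
    dsimp only at hp
    cases found with
    | false => cases hp
    | true =>
      rcases hgi : (pvLabels n).get? head with _ | i' <;> rcases hgj : (pvLabels n).get? tail with _ | j' <;>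
        simp only [hgi, hgj, reduceCtorEq, if_true, Option.some.injEq, Prod.mk.injEq] at hp
      obtain ⟨hi1, hj1⟩ : i' = i ∧ j' = j := hp
      rw [hi1] at hgi
      rw [hj1] at hgj
      obtain ⟨hhead, hi0, hin⟩ := (pv_labels_get? n head i).mp hgi
      obtain ⟨htail, hj0, hjn⟩ := (pv_labels_get? n tail j).mp hgj
      obtain ⟨hs, -⟩ := pv_partition_found s head tail hpp
      refine ⟨String.toList_inj.mp ?_, hi0, hin, hj0, hjn⟩
      rw [hs, pv_pairId_toList, hhead, htail]
  · rintro ⟨rfl, hi0, hin, hj0, hjn⟩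
    unfold pvParseLbl
    rw [pv_partition_pairId i j]
    dsimp only
    rw [(pv_labels_get? n _ i).mpr ⟨rfl, hi0, hin⟩,
        (pv_labels_get? n _ j).mpr ⟨rfl, hj0, hjn⟩]
    rfl

-- what ends up in the per-row buckets of Source B's second loop
theorem pv_mem_done (labels : PySem.Dict (List Char) Int) :
    ∀ (cp : List String) (d : PySem.Dict Int (PySem.Set Int)) (i j : Int),
    (j ∈ (cp.foldl (fun done s =>
      match pvPartitionU s with
      | (_, false, _) => done
      | (head, true, tail) =>
        match labels.get? head, labels.get? tail with
        | some i, some j => done.modify i PySem.Set.empty (fun st => PySem.Set.add st j)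
        | _, _ => done) d).getD i PySem.Set.empty
    ↔ j ∈ d.getD i PySem.Set.empty ∨ ∃ s ∈ cp, pvParseLbl labels s = some (i, j)) := by
  intro cp
  induction cp with
  | nil => intro d i j; simp
  | cons s cp ih =>
    intro d i j
    rw [List.foldl_cons]
    have hstep : ∀ (d' : PySem.Dict Int (PySem.Set Int)),
        (match pvPartitionU s with
         | (_, false, _) => d'
         | (head, true, tail) =>
           match labels.get? head, labels.get? tail with
           | some i, some j => d'.modify i PySem.Set.empty (fun st => PySem.Set.add st j)
           | _, _ => d')
        = (match pvParseLbl labels s with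
           | some (a, b) => d'.modify a PySem.Set.empty (fun st => PySem.Set.add st b)
           | none => d') := by
      intro d'
      unfold pvParseLbl
      rcases pvPartitionU s with ⟨head, found, tail⟩
      cases found
      · rfl
      · dsimp only
        rcases labels.get? head with _ | i' <;> rcases labels.get? tail with _ | j' <;> rfl
    rw [hstep, ih]
    rcases hps : pvParseLbl labels s with _ | ⟨a, b⟩
    · constructor
      · rintro (hm | ⟨s', hs', hp⟩)
        · exact Or.inl hm
        · exact Or.inr ⟨s', List.mem_cons_of_mem _ hs', hp⟩
      · rintro (hm | ⟨s', hs', hp⟩)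
        · exact Or.inl hm
        · rcases List.mem_cons.mp hs' with rfl | hmem
          · rw [hps] at hp; cases hp
          · exact Or.inr ⟨s', hmem, hp⟩
    · rw [PySem.Dict.getD_modify]
      by_cases hia : i = a
      · subst hia
        rw [if_pos rfl, PySem.Set.mem_add]
        constructor
        · rintro ((hm | rfl) | ⟨s', hs', hp⟩)
          · exact Or.inl hm
          · exact Or.inr ⟨s, List.mem_cons_self .., hps⟩
          · exact Or.inr ⟨s', List.mem_cons_of_mem _ hs', hp⟩
        · rintro (hm | ⟨s', hs', hp⟩)
          · exact Or.inl (Or.inl hm)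
          · rcases List.mem_cons.mp hs' with rfl | hmem
            · rw [hps] at hp
              have hbj : b = j := by simpa [Prod.mk.injEq] using hp
              exact Or.inl (Or.inr hbj.symm)
            · exact Or.inr ⟨s', hmem, hp⟩
      · rw [if_neg hia]
        constructor
        · rintro (hm | ⟨s', hs', hp⟩)
          · exact Or.inl hm
          · exact Or.inr ⟨s', List.mem_cons_of_mem _ hs', hp⟩
        · rintro (hm | ⟨s', hs', hp⟩)
          · exact Or.inl hm
          · rcases List.mem_cons.mp hs' with rfl | hmem
            · rw [hps] at hp
              have hai : a = i := (by simpa [Prod.mk.injEq] using hp : a = i ∧ b = j).1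
              exact absurd hai.symm hia
            · exact Or.inr ⟨s', hmem, hp⟩

-- the row bucket answers exactly A's membership test (on the queried rows and columns)
theorem pv_done_contains (n : Int) (cp : List String) (i j : Int)
    (hi0 : 0 ≤ i) (hin : i < n) (hij : i ≤ j) (hjn : j < n) :
    PySem.Set.contains ((pvDone (pvLabels n) cp).getD i PySem.Set.empty) j
      = cp.contains (pvPairId i j) := by
  rw [Bool.eq_iff_iff, PySem.Set.contains_iff, List.contains_iff_mem]
  unfold pvDone
  rw [pv_mem_done]
  constructor
  · rintro (hm | ⟨s, hs, hp⟩)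
    · simp at hm
    · exact ((pv_parse_eq_iff n s i j).mp hp).1 ▸ hs
  · intro hm
    exact Or.inr ⟨pvPairId i j, hm,
      (pv_parse_eq_iff n _ i j).mpr ⟨rfl, hi0, hin, by omega, hjn⟩⟩

-- inner-loop shape: once i is in the set, A's per-pair double add is a plain add of j
theorem pv_foldl_row_mem (c : Int → Bool) (i : Int) :
    ∀ (R : List Int) (s : PySem.Set Int), i ∈ s →
      R.foldl (fun s j => if !(c j) then PySem.Set.add (PySem.Set.add s i) j else s) s
        = (R.filter (fun j => !(c j))).foldl PySem.Set.add s := by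
  intro R
  induction R with
  | nil => intro s _; rfl
  | cons j R ih =>
    intro s hi
    rw [List.foldl_cons, List.filter_cons]
    by_cases hc : (!(c j)) = true
    · rw [if_pos hc, hc, if_pos rfl, List.foldl_cons]
      rw [PySem.Set.add_of_mem hi]
      exact ih (PySem.Set.add s j) ((PySem.Set.mem_add s j i).mpr (Or.inl hi))
    · rw [if_neg hc, if_neg (by simpa using hc)]
      exact ih s hi

-- A's row fold = "emit i and the missing columns, skip complete rows"
theorem pv_row_eq (c : Int → Bool) (i : Int) (R : List Int) (s : PySem.Set Int) :
    R.foldl (fun s j => if !(c j) then PySem.Set.add (PySem.Set.add s i) j else s) s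
      = (if !(R.filter (fun j => !(c j))).isEmpty
         then (R.filter (fun j => !(c j))).foldl PySem.Set.add (PySem.Set.add s i)
         else s) := by
  induction R generalizing s with
  | nil => simp
  | cons j R ih =>
    rw [List.foldl_cons, List.filter_cons]
    cases hcj : c j with
    | false =>
      have hmem : i ∈ PySem.Set.add (PySem.Set.add s i) j := by
        rw [PySem.Set.mem_add]
        exact Or.inl ((PySem.Set.mem_add s i i).mpr (Or.inr rfl))
      simp only [Bool.not_false, if_true, List.isEmpty_cons, List.foldl_cons]
      exact pv_foldl_row_mem c i R _ hmem
    | true =>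
      simp only [Bool.not_true, Bool.false_eq_true, if_false]
      exact ih s

-- B's per-row "missing" value IS the filtered ascending range
theorem pv_missing_eq (i n : Int) (di : PySem.Set Int) :
    (if !di.isEmpty then
        PySem.List.sorted
          (PySem.Set.diff (PySem.Set.ofList (PySem.List.pyRange i n 1)) di)
          (fun x => x)
      else PySem.List.pyRange i n 1)
      = (PySem.List.pyRange i n 1).filter (fun j => !(PySem.Set.contains di j)) := by
  by_cases hemp : di.isEmpty
  · rw [if_neg (by simp [hemp])]
    rw [List.isEmpty_iff] at hemp
    subst hemp
    rw [List.filter_eq_self.mpr (by intro j _; simp [PySem.Set.contains])]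
  · rw [if_pos (by simpa using hemp)]
    show PySem.List.sorted (PySem.Set.diff (PySem.Set.ofList (PySem.List.pyRange i n 1)) di) (fun x => x) = _
    rw [PySem.Set.ofList_eq_self_of_nodup _ (PySem.List.nodup_pyRange_one i n)]
    show PySem.List.sorted ((PySem.List.pyRange i n 1).filter (fun x => !di.contains x)) (fun x => x) = _
    exact PySem.List.sorted_eq_of_perm_of_pairwise_lt _ _ _ (List.Perm.refl _)
      ((PySem.List.pairwise_lt_pyRange_one i n).filter _)

-- ===== VERDICT (by name: the statement is the Claim_ definition above) =====
theorem identify_blocks_to_build_spec : Claim_equal_identify_blocks_to_build := by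
  intro n cp _
  unfold Spec_identify_blocks_to_build identify_blocks_to_build identify_blocks_to_build_alt
  simp only []
  apply List.foldl_ext
  intro acc i hi
  obtain ⟨h0i, hin⟩ := PySem.List.mem_pyRange_one.mp hi
  rw [pv_missing_eq i n]
  rw [List.filter_congr (q := fun j => !(cp.contains (pvPairId i j)))
      (by intro j hj
          obtain ⟨hij, hjn⟩ := PySem.List.mem_pyRange_one.mp hj
          rw [pv_done_contains n cp i j h0i hin hij hjn])]
  rw [PySem.Set.update_eq_foldl]
  exact pv_row_eq (fun j => cp.contains (pvPairId i j)) i _ acc
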